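-- pv_equiv track=rewrite | github.com/cpr888/PODEM | python code/gates_lib.py | XOR_gate
-- ===== SOURCE A (Python) =====
-- def XOR_gate(input_list):
-- 	flag =0
-- 	count =0
-- 	for input in input_list:
-- 			if(input=='x'):
-- 				return 'x'
-- 			else:
-- 				if(input=='1'):
-- 					count =count +1
--
-- 	if(count % 2 !=0):				#Odd no of 1
-- 		return '1'
-- 	else:
-- 		return '0'
-- ===== SOURCE B (Python) =====
-- def XOR_gate(input_list):
--     def xor2(a, b):
--         # two-input ternary XOR; 'x' is absorbing, non-'1' non-'x' inputs act as '0'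
--         if a == 'x' or b == 'x':
--             return 'x'
--         if b == '1':
--             return '0' if a == '1' else '1'
--         return a
--     acc = '0'
--     for v in input_list:
--         acc = xor2(acc, v)
--     return acc
-- ===== Notes on version B (the rewrite author's own statement) =====
-- stated objective: alternative
-- what changed: A scans with an early return on 'x' while accumulating a count of '1's and takes its parity at the end; B maintains no count at all: it reduces the list with a two-input ternary XOR truth table (xor2) in which 'x' is absorbing, folding from the identity '0'.
import Mathlib
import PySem

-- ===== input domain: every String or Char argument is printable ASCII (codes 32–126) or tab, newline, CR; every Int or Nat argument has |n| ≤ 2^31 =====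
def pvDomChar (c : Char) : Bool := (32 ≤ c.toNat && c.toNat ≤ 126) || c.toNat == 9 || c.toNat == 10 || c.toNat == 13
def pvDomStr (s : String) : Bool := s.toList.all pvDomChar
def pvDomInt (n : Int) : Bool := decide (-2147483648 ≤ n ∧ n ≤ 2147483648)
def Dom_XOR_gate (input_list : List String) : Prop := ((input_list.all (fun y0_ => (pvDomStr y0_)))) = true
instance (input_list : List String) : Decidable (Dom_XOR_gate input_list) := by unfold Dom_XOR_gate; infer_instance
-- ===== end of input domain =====

-- B replaces A's early-return scan with a '1'-count by a fold of a two-input ternary XOR truth table with 'x' absorbing (objective: alternative).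

-- ===== PORT A =====
-- A's loop: returns "x" on the first "x", else accumulates a count of "1"s, parity at the end.
def XOR_gate_loop (rest : List String) (count : Int) : String :=
  match rest with
  | [] => if count % 2 != 0 then "1" else "0"
  | input :: rest' =>
    if input == "x" then "x"
    else XOR_gate_loop rest' (if input == "1" then count + 1 else count)

def XOR_gate (input_list : List String) : String :=
  XOR_gate_loop input_list 0

-- ===== PORT B =====
-- two-input ternary XOR; "x" is absorbing, any non-"1" non-"x" input acts as "0"
def pvXor2 (a b : String) : String :=
  if a == "x" || b == "x" then "x"
  else if b == "1" then (if a == "1" then "0" else "1")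
  else a

def XOR_gate_alt (input_list : List String) : String :=
  input_list.foldl pvXor2 "0"

-- ===== PRECONDITION & SPEC =====
def Spec_XOR_gate (input_list : List String) (out : String) : Prop := out = XOR_gate_alt input_list
instance (input_list : List String) (out : String) : Decidable (Spec_XOR_gate input_list out) := by unfold Spec_XOR_gate; infer_instance

-- ===== CLAIM (what is proved, stated in full; the proofs are below) =====
def Claim_equal_XOR_gate : Prop := ∀ (input_list : List String), Dom_XOR_gate input_list → Spec_XOR_gate input_list (XOR_gate input_list)

-- ===== LEMMAS AND PROOFS =====
-- "x" is absorbing for the fold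
theorem foldl_xor2_x (l : List String) : l.foldl pvXor2 "x" = "x" := by
  induction l with
  | nil => rfl
  | cons h t ih => simpa [pvXor2] using ih

-- loop/fold correspondence: the fold's accumulator is the parity of the loop's count
theorem XOR_gate_loop_eq_foldl (l : List String) (count : Int) (acc : String)
    (h : acc = if count % 2 != 0 then "1" else "0") :
    XOR_gate_loop l count = l.foldl pvXor2 acc := by
  induction l generalizing count acc with
  | nil => simp [XOR_gate_loop, h]
  | cons v t ih =>
    simp only [XOR_gate_loop, List.foldl_cons]
    by_cases hx : v == "x"
    · have hv : v = "x" := by simpa using hx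
      subst hv
      rw [show pvXor2 acc "x" = "x" by simp [pvXor2], foldl_xor2_x]
      simp
    · have hvne : v ≠ "x" := by simpa using hx
      simp only [hx]
      by_cases h1 : v == "1"
      · have hv : v = "1" := by simpa using h1
        subst hv
        simp only [if_pos (by rfl : ("1" : String) == "1")]
        apply ih
        by_cases hc : count % 2 = 0
        · have h2 : (count + 1) % 2 = 1 := by omega
          simp [pvXor2, h, hc, h2]
        · have hc' : count % 2 = 1 := Int.emod_two_eq count |>.resolve_left hc
          have h2 : (count + 1) % 2 = 0 := by omega
          simp [pvXor2, h, hc', h2]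
      · have h1' : (v == "1") = false := by simpa using h1
        rw [h1']
        simp only [Bool.false_eq_true, if_false]
        have hpx : pvXor2 acc v = acc := by
          by_cases hc : count % 2 = 0 <;> simp_all [pvXor2]
        rw [hpx]
        exact ih count acc h

-- ===== VERDICT (by name: the statement is the Claim_ definition above) =====
theorem XOR_gate_spec : Claim_equal_XOR_gate := by
  intro l _
  unfold Spec_XOR_gate XOR_gate XOR_gate_alt
  exact XOR_gate_loop_eq_foldl l 0 "0" (by decide)
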